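-- pv_equiv track=rewrite | github.com/ZexuSun/AgentSkiller | rollout/rollout/utils/cross_domain.py | normalize_domain_set
-- ===== SOURCE A (Python) =====
-- def normalize_domain_set(domain_string: str) -> frozenset:
--     """
--     Extract domains from a combined domain string and return as a frozenset.
--     Order-agnostic comparison.
--
--     Example:
--         "StudentAcademicPortal_StudentFinancialServices_StudentHealthServices"
--         -> frozenset({'StudentAcademicPortal', 'StudentFinancialServices', 'StudentHealthServices'})
--     """
--     # Split by underscore but handle cases where domain names contain underscores
--     # Domain names are CamelCase, so we split on the pattern where lowercase/digit
--     # is followed by uppercase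
--     parts = domain_string.split('_')
--
--     # Reconstruct domain names by joining parts that form valid CamelCase names
--     domains = []
--     current = []
--
--     for part in parts:
--         if part and part[0].isupper():
--             if current:
--                 domains.append('_'.join(current))
--             current = [part]
--         else:
--             current.append(part)
--
--     if current:
--         domains.append('_'.join(current))
--
--     return frozenset(domains)
-- ===== SOURCE B (Python) =====
-- import re
--
-- def normalize_domain_set(domain_string: str) -> frozenset:
--     # One regex split at each underscore that is immediately followed by an
--     # uppercase letter; interior underscores stay, frozenset deduplicates.
--     return frozenset(re.split(r'_(?=[A-Z])', domain_string))
-- ===== Notes on version B (the rewrite author's own statement) =====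
-- stated objective: idiomatic
-- what changed: Replaces A's split-then-regroup loop (domains/current accumulator lists with a final flush) by a single zero-width-lookahead regex split at each underscore immediately followed by an ASCII uppercase letter, fed straight to frozenset.
import Mathlib
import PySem

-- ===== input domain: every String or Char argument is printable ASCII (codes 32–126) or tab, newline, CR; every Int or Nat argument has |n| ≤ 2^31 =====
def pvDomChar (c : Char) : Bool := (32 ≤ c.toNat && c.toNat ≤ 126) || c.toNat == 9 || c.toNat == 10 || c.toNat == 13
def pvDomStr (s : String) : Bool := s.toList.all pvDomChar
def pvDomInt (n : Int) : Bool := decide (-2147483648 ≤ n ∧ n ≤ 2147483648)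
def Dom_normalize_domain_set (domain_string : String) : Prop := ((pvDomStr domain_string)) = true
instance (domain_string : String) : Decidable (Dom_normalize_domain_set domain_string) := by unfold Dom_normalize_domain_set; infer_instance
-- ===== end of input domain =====

-- B replaces A's part-by-part group-accumulator loop by a single regex-style split at
-- each '_' followed by an uppercase letter (re.split with lookahead); objective: idiomatic.


-- ===== PORT A =====
-- loop body of A: state = (domains, current)
def pvAStep (st : List String × List String) (part : String) : List String × List String :=
  match part.toList with          -- 'if part and part[0].isupper()'
  | c :: _ =>
    if PySem.Chars.isupper c then
      if st.2 = [] then (st.1, [part])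
      else (st.1 ++ [PySem.Str.join "_" st.2], [part])
    else (st.1, st.2 ++ [part])
  | [] => (st.1, st.2 ++ [part])

def normalize_domain_set (domain_string : String) : List String :=
  -- parts = domain_string.split('_'); the separator "_" is nonempty, so split? is never none
  let parts : List String := (PySem.Str.split? domain_string "_").getD []
  let st := parts.foldl pvAStep ([], [])
  let domains := if st.2 = [] then st.1 else st.1 ++ [PySem.Str.join "_" st.2]
  PySem.Set.ofList domains

-- ===== PORT B =====
-- hand-port of re.split(r'_(?=[A-Z])', s) over the char list (exact for this pattern:
-- split at every '_' whose immediately following char is an ASCII uppercase letter;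
-- PySem.Chars.isupper is exactly [A-Z]); segments returned in order
def pvReSplitCamel : List Char → List Char → List (List Char)
  | [], acc => [acc.reverse]
  | c :: rest, acc =>
    if c = '_' then
      match rest with
      | d :: _ =>
        if PySem.Chars.isupper d then acc.reverse :: pvReSplitCamel rest []
        else pvReSplitCamel rest (c :: acc)
      | [] => pvReSplitCamel rest (c :: acc)
    else pvReSplitCamel rest (c :: acc)

def normalize_domain_set_alt (domain_string : String) : List String :=
  PySem.Set.ofList ((pvReSplitCamel domain_string.toList []).map String.ofList)

-- ===== PRECONDITION & SPEC =====
def Spec_normalize_domain_set (domain_string : String) (out : List String) : Prop := out = normalize_domain_set_alt domain_string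
instance (domain_string : String) (out : List String) : Decidable (Spec_normalize_domain_set domain_string out) := by unfold Spec_normalize_domain_set; infer_instance

-- ===== CLAIM (what is proved, stated in full; the proofs are below) =====
def Claim_equal_normalize_domain_set : Prop := ∀ (domain_string : String), Dom_normalize_domain_set domain_string → Spec_normalize_domain_set domain_string (normalize_domain_set domain_string)

-- ===== LEMMAS AND PROOFS =====

def pvSplit : List Char → List Char → List (List Char)
  | [], cur => [cur.reverse]
  | c :: rest, cur => if c = '_' then cur.reverse :: pvSplit rest [] else pvSplit rest (c :: cur)

theorem pv_go_eq : ∀ (fuel : Nat) (l cur : List Char) (acc : List (List Char)), l.length < fuel →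
    PySem.Chars.splitOn.go ['_'] fuel l cur acc = acc.reverse ++ pvSplit l cur := by
  intro fuel
  induction fuel with
  | zero => intro l cur acc h; omega
  | succ n ih =>
    intro l cur acc h
    cases l with
    | nil => simp [PySem.Chars.splitOn.go, pvSplit]
    | cons c rest =>
      by_cases hc : c = '_'
      · subst hc
        simp [PySem.Chars.splitOn.go, List.isPrefixOf, pvSplit,
          ih rest [] (cur.reverse :: acc) (by simp at h ⊢; omega)]
      · have hpf : (['_'].isPrefixOf (c :: rest)) = false := by
          simp [List.isPrefixOf, Ne.symm hc]
        simp [PySem.Chars.splitOn.go, hpf, pvSplit, hc,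
          ih rest (c :: cur) acc (by simp at h ⊢; omega)]

theorem pv_splitOn_eq (cs : List Char) : PySem.Chars.splitOn cs ['_'] = pvSplit cs [] := by
  simpa using pv_go_eq (cs.length + 1) cs [] [] (by omega)

theorem pvSplit_ne_nil (l cur : List Char) : pvSplit l cur ≠ [] := by
  induction l generalizing cur with
  | nil => simp [pvSplit]
  | cons c rest ih => by_cases hc : c = '_' <;> simp [pvSplit, hc, ih]

theorem pv_join_pvSplit : ∀ (l cur : List Char),
    PySem.Chars.join ['_'] (pvSplit l cur) = cur.reverse ++ l := by
  intro l
  induction l with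
  | nil => intro cur; simp [pvSplit, PySem.Chars.join, List.intercalate]
  | cons c rest ih =>
    intro cur
    by_cases hc : c = '_'
    · subst hc
      obtain ⟨r, rs, hr⟩ : ∃ r rs, pvSplit rest [] = r :: rs := by
        cases h' : pvSplit rest [] with
        | nil => exact absurd h' (pvSplit_ne_nil rest [])
        | cons a b => exact ⟨a, b, rfl⟩
      have h2 := ih []
      rw [hr] at h2
      simp only [List.reverse_nil, List.nil_append] at h2
      simp [pvSplit, hr, PySem.Chars.join_cons_cons, h2]
    · simp only [pvSplit, if_neg hc]
      rw [ih (c :: cur)]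
      simp

theorem pv_us_free : ∀ (l cur : List Char), '_' ∉ cur →
    ∀ p ∈ pvSplit l cur, '_' ∉ p := by
  intro l
  induction l with
  | nil => intro cur hc p hp; simp [pvSplit] at hp; simp [hp]; simpa using hc
  | cons c rest ih =>
    intro cur hc p hp
    by_cases h : c = '_'
    · subst h
      simp [pvSplit] at hp
      rcases hp with rfl | hp
      · simpa using hc
      · exact ih [] (by simp) p hp
    · simp only [pvSplit, if_neg h] at hp
      exact ih (c :: cur) (by simp [hc]; exact fun e => h e.symm) p hp

theorem pv_consume : ∀ (p acc rest : List Char), '_' ∉ p →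
    pvReSplitCamel (p ++ rest) acc = pvReSplitCamel rest (p.reverse ++ acc) := by
  intro p
  induction p with
  | nil => intro acc rest _; simp
  | cons c p' ih =>
    intro acc rest h
    have hc : ¬ c = '_' := by intro e; exact h (by simp [e])
    simp only [List.cons_append, pvReSplitCamel, if_neg hc]
    rw [ih (c :: acc) rest (fun hm => h (List.mem_cons_of_mem _ hm))]
    simp

theorem pvRe_step_upper (d : Char) (t acc : List Char) (hu : PySem.Chars.isupper d = true) :
    pvReSplitCamel ('_' :: d :: t) acc = acc.reverse :: pvReSplitCamel (d :: t) [] := by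
  simp [pvReSplitCamel, hu]

theorem pvRe_step_no (d : Char) (t acc : List Char) (hu : PySem.Chars.isupper d = false) :
    pvReSplitCamel ('_' :: d :: t) acc = pvReSplitCamel (d :: t) ('_' :: acc) := by
  simp [pvReSplitCamel, hu]

def pvHeadUpper : List Char → Bool
  | [] => false
  | c :: _ => PySem.Chars.isupper c

def pvScan : List (List Char) → List Char → List (List Char)
  | [], acc => [acc.reverse]
  | p :: ps, acc =>
    match ps with
    | [] => [(p.reverse ++ acc).reverse]
    | q :: _ =>
      if pvHeadUpper q then (p.reverse ++ acc).reverse :: pvScan ps []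
      else pvScan ps ('_' :: (p.reverse ++ acc))

theorem pvScan_step_upper (p q : List Char) (ps : List (List Char)) (acc : List Char)
    (hq : pvHeadUpper q = true) :
    pvScan (p :: q :: ps) acc = (p.reverse ++ acc).reverse :: pvScan (q :: ps) [] := by
  simp [pvScan, hq]

theorem pvScan_step_no (p q : List Char) (ps : List (List Char)) (acc : List Char)
    (hq : pvHeadUpper q = false) :
    pvScan (p :: q :: ps) acc = pvScan (q :: ps) ('_' :: (p.reverse ++ acc)) := by
  simp [pvScan, hq]

theorem pv_key : ∀ (ps : List (List Char)) (p acc : List Char),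
    (∀ q ∈ p :: ps, '_' ∉ q) →
    pvReSplitCamel (PySem.Chars.join ['_'] (p :: ps)) acc = pvScan (p :: ps) acc := by
  intro ps
  induction ps with
  | nil =>
    intro p acc h
    have hj : PySem.Chars.join ['_'] [p] = p := by simp [PySem.Chars.join, List.intercalate]
    rw [hj]
    have := pv_consume p acc [] (h p (by simp))
    simpa [pvReSplitCamel, pvScan] using this
  | cons q ps' ih =>
    intro p acc h
    rw [PySem.Chars.join_cons_cons, List.append_assoc, pv_consume p acc _ (h p (by simp))]
    have hrec : ∀ a, pvReSplitCamel (PySem.Chars.join ['_'] (q :: ps')) a = pvScan (q :: ps') a :=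
      fun a => ih q a (fun r hr => h r (by simp at hr ⊢; tauto))
    rw [List.singleton_append]
    cases hqq : q with
    | nil =>
      subst hqq
      cases ps' with
      | nil =>
        simp [pvReSplitCamel, pvScan, pvHeadUpper, PySem.Chars.join, List.intercalate]
      | cons r rs =>
        have hj : PySem.Chars.join ['_'] ([] :: r :: rs) = '_' :: PySem.Chars.join ['_'] (r :: rs) := by
          rw [PySem.Chars.join_cons_cons]; rfl
        rw [hj, pvRe_step_no '_' _ _ (by decide), ← hj, hrec,
          pvScan_step_no p [] _ acc rfl]
    | cons d q' =>
      subst hqq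
      obtain ⟨t, ht⟩ : ∃ t, PySem.Chars.join ['_'] ((d :: q') :: ps') = d :: t := by
        cases ps' with
        | nil => exact ⟨q', by simp [PySem.Chars.join, List.intercalate]⟩
        | cons r rs =>
          exact ⟨q' ++ '_' :: PySem.Chars.join ['_'] (r :: rs), by
            rw [PySem.Chars.join_cons_cons]; simp⟩
      by_cases hu : PySem.Chars.isupper d = true
      · rw [ht, pvRe_step_upper d t _ hu, ← ht, hrec,
          pvScan_step_upper p (d :: q') ps' acc (by simpa [pvHeadUpper] using hu)]
      · rw [ht, pvRe_step_no d t _ (by simpa using hu), ← ht, hrec,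
          pvScan_step_no p (d :: q') ps' acc (by simpa [pvHeadUpper] using hu)]

def pvGrp : List (List Char) → List (List Char) → List (List Char)
  | [], cur => if cur = [] then [] else [PySem.Chars.join ['_'] cur]
  | p :: ps, cur =>
    match p with
    | c :: _ =>
      if PySem.Chars.isupper c then
        if cur = [] then pvGrp ps [p] else PySem.Chars.join ['_'] cur :: pvGrp ps [p]
      else pvGrp ps (cur ++ [p])
    | [] => pvGrp ps (cur ++ [p])

def pvGrpS : List String → List String → List String
  | [], cur => if cur = [] then [] else [PySem.Str.join "_" cur]
  | p :: ps, cur =>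
    match p.toList with
    | c :: _ =>
      if PySem.Chars.isupper c then
        if cur = [] then pvGrpS ps [p] else PySem.Str.join "_" cur :: pvGrpS ps [p]
      else pvGrpS ps (cur ++ [p])
    | [] => pvGrpS ps (cur ++ [p])

theorem pv_fold_eq : ∀ (ps : List String) (d cur : List String),
    (let st := ps.foldl pvAStep (d, cur);
     if st.2 = [] then st.1 else st.1 ++ [PySem.Str.join "_" st.2]) = d ++ pvGrpS ps cur := by
  intro ps
  induction ps with
  | nil =>
    intro d cur
    by_cases h : cur = [] <;> simp [pvGrpS, h]
  | cons p ps ih =>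
    intro d cur
    simp only [List.foldl_cons]
    cases hp : p.toList with
    | nil =>
      simpa [pvAStep, hp, pvGrpS] using ih d (cur ++ [p])
    | cons c cs =>
      by_cases hu : PySem.Chars.isupper c = true
      · by_cases hc : cur = []
        · simpa [pvAStep, hp, hu, hc, pvGrpS] using ih d [p]
        · have := ih (d ++ [PySem.Str.join "_" cur]) [p]
          simp only [List.append_assoc] at this
          simpa [pvAStep, hp, hu, hc, pvGrpS] using this
      · simpa [pvAStep, hp, hu, pvGrpS] using ih d (cur ++ [p])

theorem pv_join_ofList (cur : List (List Char)) :
    PySem.Str.join "_" (cur.map String.ofList) = String.ofList (PySem.Chars.join ['_'] cur) := by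
  have h := PySem.Str.toList_join "_" (cur.map String.ofList)
  have h2 : (PySem.Str.join "_" (cur.map String.ofList)).toList = PySem.Chars.join ['_'] cur := by
    have hsep : ("_" : String).toList = ['_'] := by decide
    rw [h, hsep]
    simp [List.map_map, Function.comp_def, String.toList_ofList]
  calc PySem.Str.join "_" (cur.map String.ofList)
      = String.ofList (PySem.Str.join "_" (cur.map String.ofList)).toList := by
        rw [String.ofList_toList]
    _ = String.ofList (PySem.Chars.join ['_'] cur) := by rw [h2]

theorem pv_lift : ∀ (ps cur : List (List Char)),
    pvGrpS (ps.map String.ofList) (cur.map String.ofList) = (pvGrp ps cur).map String.ofList := by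
  intro ps
  induction ps with
  | nil =>
    intro cur
    by_cases h : cur = [] <;> simp [pvGrpS, pvGrp, h, pv_join_ofList]
  | cons p ps ih =>
    intro cur
    simp only [List.map_cons, pvGrpS, pvGrp, String.toList_ofList]
    cases p with
    | nil =>
      have := ih (cur ++ [[]])
      simpa using this
    | cons c cs =>
      by_cases hu : PySem.Chars.isupper c = true
      · by_cases hc : cur = []
        · simp [hu, hc]
          simpa using ih [c :: cs]
        · have hc' : ¬ (cur.map String.ofList = []) := by simpa using hc
          simp [hu, hc, hc', pv_join_ofList]
          simpa using ih [c :: cs]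
      · have := ih (cur ++ [c :: cs])
        simp only [hu] at *
        simpa using this

theorem pv_join_append_singleton : ∀ (cur : List (List Char)) (p : List Char), cur ≠ [] →
    PySem.Chars.join ['_'] (cur ++ [p]) = PySem.Chars.join ['_'] cur ++ '_' :: p := by
  intro cur
  induction cur with
  | nil => intro p h; exact absurd rfl h
  | cons a cs ih =>
    intro p _
    cases cs with
    | nil => simp [PySem.Chars.join, List.intercalate]
    | cons b bs =>
      have h1 : PySem.Chars.join ['_'] ((a :: b :: bs) ++ [p]) =
          a ++ ['_'] ++ PySem.Chars.join ['_'] ((b :: bs) ++ [p]) := by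
        rw [List.cons_append]
        exact PySem.Chars.join_cons_cons ['_'] a b (bs ++ [p])
      rw [h1, ih p (by simp), PySem.Chars.join_cons_cons]
      simp

theorem pvGrp_cons_nil (p : List Char) (ps : List (List Char)) :
    pvGrp (p :: ps) [] = pvGrp ps [p] := by
  cases p with
  | nil => simp [pvGrp]
  | cons c cs => by_cases hu : PySem.Chars.isupper c = true <;> simp [pvGrp, hu]

theorem pvGrp_cons_upper (q : List Char) (ps : List (List Char)) (cur : List (List Char))
    (hq : pvHeadUpper q = true) (hc : cur ≠ []) :
    pvGrp (q :: ps) cur = PySem.Chars.join ['_'] cur :: pvGrp ps [q] := by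
  cases q with
  | nil => simp [pvHeadUpper] at hq
  | cons c cs =>
    simp only [pvHeadUpper] at hq
    simp [pvGrp, hq, hc]

theorem pvGrp_cons_no (q : List Char) (ps : List (List Char)) (cur : List (List Char))
    (hq : pvHeadUpper q = false) :
    pvGrp (q :: ps) cur = pvGrp ps (cur ++ [q]) := by
  cases q with
  | nil => simp [pvGrp]
  | cons c cs =>
    simp only [pvHeadUpper] at hq
    simp [pvGrp, hq]

theorem pv_scan_grp : ∀ (ps : List (List Char)) (p : List Char) (cur : List (List Char)) (acc : List Char),
    ((cur = [] ∧ acc = []) ∨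
     (cur ≠ [] ∧ acc.reverse = PySem.Chars.join ['_'] cur ++ ['_'] ∧ pvHeadUpper p = false)) →
    pvScan (p :: ps) acc = pvGrp (p :: ps) cur := by
  intro ps
  induction ps with
  | nil =>
    intro p cur acc hH
    rcases hH with ⟨rfl, rfl⟩ | ⟨hc, hacc, hup⟩
    · rw [pvGrp_cons_nil]
      cases p <;> simp [pvScan, pvGrp, PySem.Chars.join_singleton]
    · show [(p.reverse ++ acc).reverse] = _
      rw [pvGrp_cons_no p [] cur hup]
      have : (p.reverse ++ acc).reverse = PySem.Chars.join ['_'] (cur ++ [p]) := by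
        rw [List.reverse_append, List.reverse_reverse, hacc, pv_join_append_singleton cur p hc]
        simp
      simp [pvGrp, this]
  | cons q ps' ih =>
    intro p cur acc hH
    by_cases hq : pvHeadUpper q = true
    · rw [pvScan_step_upper p q ps' acc hq]
      have hscan : pvScan (q :: ps') [] = pvGrp ps' [q] := by
        rw [ih q [] [] (Or.inl ⟨rfl, rfl⟩), pvGrp_cons_nil]
      rcases hH with ⟨rfl, rfl⟩ | ⟨hc, hacc, hup⟩
      · rw [pvGrp_cons_nil, pvGrp_cons_upper q ps' [p] hq (by simp), hscan]
        simp [PySem.Chars.join_singleton]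
      · rw [pvGrp_cons_no p (q :: ps') cur hup,
          pvGrp_cons_upper q ps' (cur ++ [p]) hq (by simp), hscan,
          pv_join_append_singleton cur p hc]
        rw [List.reverse_append, List.reverse_reverse, hacc]
        simp
    · have hq' : pvHeadUpper q = false := by simpa using hq
      rw [pvScan_step_no p q ps' acc hq']
      rcases hH with ⟨rfl, rfl⟩ | ⟨hc, hacc, hup⟩
      · rw [ih q [p] ('_' :: (p.reverse ++ [])) (Or.inr ⟨by simp, by
            simp [PySem.Chars.join_singleton], hq'⟩), pvGrp_cons_nil]
      · rw [ih q (cur ++ [p]) ('_' :: (p.reverse ++ acc)) (Or.inr ⟨by simp, by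
            rw [List.reverse_cons, List.reverse_append, List.reverse_reverse, hacc,
              pv_join_append_singleton cur p hc]
            simp, hq'⟩), pvGrp_cons_no p (q :: ps') cur hup]

theorem pv_main (s : String) : normalize_domain_set s = normalize_domain_set_alt s := by
  have hsep : ("_" : String).toList = ['_'] := by decide
  have hsplit : (PySem.Str.split? s "_").getD [] = (pvSplit s.toList []).map String.ofList := by
    unfold PySem.Str.split? PySem.Chars.split?
    rw [hsep]
    simp [pv_splitOn_eq]
  obtain ⟨p, ps, hps⟩ : ∃ p ps, pvSplit s.toList [] = p :: ps := by
    cases h : pvSplit s.toList [] with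
    | nil => exact absurd h (pvSplit_ne_nil _ _)
    | cons a b => exact ⟨a, b, rfl⟩
  have hfree : ∀ q ∈ p :: ps, '_' ∉ q := by
    rw [← hps]
    exact pv_us_free s.toList [] (by simp)
  have hjoin : PySem.Chars.join ['_'] (p :: ps) = s.toList := by
    rw [← hps, pv_join_pvSplit]
    simp
  have hB : pvReSplitCamel s.toList [] = pvGrp (p :: ps) [] := by
    rw [← hjoin, pv_key ps p [] hfree, pv_scan_grp ps p [] [] (Or.inl ⟨rfl, rfl⟩)]
  have hA := pv_fold_eq ((pvSplit s.toList []).map String.ofList) [] []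
  have hlift := pv_lift (p :: ps) []
  simp only [List.map_nil] at hlift
  unfold normalize_domain_set normalize_domain_set_alt
  dsimp only
  rw [hsplit, hA, hps, List.nil_append, hlift, hB]

-- ===== VERDICT (by name: the statement is the Claim_ definition above) =====
theorem normalize_domain_set_spec : Claim_equal_normalize_domain_set := by
  intro s _
  unfold Spec_normalize_domain_set
  exact pv_main s
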